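-- pv_equiv track=rewrite | github.com/AdamZhouSE/pythonHomework | Code/CodeRecords/2236/60634/279380.py | inquire
-- ===== SOURCE A (Python) =====
-- def inquire(value,tree):
--     result = tree[0]['rank']
--     p = 0
--     while tree[p]['value'] != value:
--         if value > tree[p]['value']:
--             result += tree[p]['num']
--             p = 2 * p + 2
--             result += tree[p]['rank']
--         else:
--             p = 2 * p + 1
--             result -= tree[p]['num']
--     return result + 1
-- ===== SOURCE B (Python) =====
-- def inquire(value, tree):
--     # stage 1: materialize the comparison-driven search path as a list of indices
--     def path_from(p):
--         v = tree[p]['value']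
--         if v == value:
--             return [p]
--         child = 2 * p + 2 if value > v else 2 * p + 1
--         return [p] + path_from(child)
--
--     path = path_from(0)
--     # stage 2: fold the rank adjustments over consecutive (parent, child) edges
--     total = tree[0]['rank'] + 1
--     for parent, child in zip(path, path[1:]):
--         if child == 2 * parent + 2:
--             total = total + tree[parent]['num'] + tree[child]['rank']
--         else:
--             total = total - tree[child]['num']
--     return total
-- ===== Notes on version B (the rewrite author's own statement) =====
-- stated objective: alternative
-- what changed: Splits the single accumulator walk into two stages: first materialize the search path as an explicit list of node indices, then fold the rank adjustments over the list of consecutive (parent, child) edges.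
import Mathlib
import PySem

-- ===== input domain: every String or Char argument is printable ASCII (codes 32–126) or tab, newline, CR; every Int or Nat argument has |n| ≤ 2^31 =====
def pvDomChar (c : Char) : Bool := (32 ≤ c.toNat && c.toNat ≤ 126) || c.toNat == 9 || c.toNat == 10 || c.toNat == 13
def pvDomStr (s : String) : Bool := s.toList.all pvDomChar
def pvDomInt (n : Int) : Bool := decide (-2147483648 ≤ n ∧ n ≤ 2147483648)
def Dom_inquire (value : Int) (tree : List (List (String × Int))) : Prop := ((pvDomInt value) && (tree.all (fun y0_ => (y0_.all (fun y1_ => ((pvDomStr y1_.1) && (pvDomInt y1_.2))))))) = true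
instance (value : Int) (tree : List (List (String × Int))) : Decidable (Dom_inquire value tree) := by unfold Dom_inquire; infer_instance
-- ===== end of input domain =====

-- B replaces the accumulator walk by two stages (explicit path list, then a fold over its edges); same cost.
-- ===== PORT A =====
-- first-match association-list lookup (dict convention): d[k], none = KeyError
def dget (d : List (String × Int)) (k : String) : Option Int :=
  (d.find? (fun kv => kv.1 == k)).map (fun kv => kv.2)

-- tree[p][k] totalised with default 0; Pre_ keeps us where Python does not raise
def nodeGet (tree : List (List (String × Int))) (p : Nat) (k : String) : Int :=
  ((PySem.List.pyGet? tree (p : Int)).bind (fun d => dget d k)).getD 0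

-- A's while loop; fuel bounds the walk (p strictly increases, so tree.length+1 steps suffice)
def inquireLoop (value : Int) (tree : List (List (String × Int))) :
    Nat → Nat → Int → Int
  | 0, _, result => result
  | fuel + 1, p, result =>
    if nodeGet tree p "value" ≠ value then
      if value > nodeGet tree p "value" then
        inquireLoop value tree fuel (2 * p + 2)
          (result + nodeGet tree p "num" + nodeGet tree (2 * p + 2) "rank")
      else
        inquireLoop value tree fuel (2 * p + 1)
          (result - nodeGet tree (2 * p + 1) "num")
    else result

def inquire (value : Int) (tree : List (List (String × Int))) : Int :=
  inquireLoop value tree (tree.length + 1) 0 (nodeGet tree 0 "rank") + 1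

-- ===== PORT B =====
-- stage 1 (Source B's path_from): the search path as a list of node indices; fuel as in A
def pathB (value : Int) (tree : List (List (String × Int))) :
    Nat → Nat → List Nat
  | 0, p => [p]
  | fuel + 1, p =>
    let v := nodeGet tree p "value"
    if v = value then [p]
    else [p] ++ pathB value tree fuel (if value > v then 2 * p + 2 else 2 * p + 1)

-- stage 2's loop body: one (parent, child) edge adjusts the running total
def edgeStep (tree : List (List (String × Int))) (total : Int) (pc : Nat × Nat) : Int :=
  if pc.2 = 2 * pc.1 + 2 then
    total + nodeGet tree pc.1 "num" + nodeGet tree pc.2 "rank"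
  else
    total - nodeGet tree pc.2 "num"

def inquire_alt (value : Int) (tree : List (List (String × Int))) : Int :=
  let path := pathB value tree (tree.length + 1) 0
  (path.zip path.tail).foldl (edgeStep tree) (nodeGet tree 0 "rank" + 1)

-- ===== PRECONDITION & SPEC =====
-- Pre_ = the natural domain, in closed form: value is stored at some heap index q whose
-- ancestor chain (the binary-arithmetic parents (q+1)/2^k - 1) carries keys consistent with
-- the comparison directions, with every array cell / dict key read along that chain present;
-- outside it Python A (and B) raise IndexError/KeyError. The ports are totalised (missing
-- lookups read 0), so the equivalence proof below holds for ALL inputs and does not need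
-- Pre_; Pre_ is stated because it is exactly where the PYTHON programs return.
def nodeKey? (tree : List (List (String × Int))) (p : Nat) (k : String) : Option Int :=
  (PySem.List.pyGet? tree (p : Int)).bind (fun d => dget d k)

-- the k-th ancestor of heap index q
def ancIdx (q k : Nat) : Nat := (q + 1) / 2 ^ k - 1

-- the chain edge from the k-th ancestor down to the (k-1)-th: key present, comparison
-- direction matches the child side, and the cells the walk reads on that edge exist
def edgeOk (value : Int) (tree : List (List (String × Int))) (q k : Nat) : Bool :=
  let p := ancIdx q k
  let c := ancIdx q (k - 1)
  match nodeKey? tree p "value" with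
  | none => false
  | some vp =>
    if vp = value then false
    else if value > vp then
      decide (c = 2 * p + 2) && (nodeKey? tree p "num").isSome &&
        (nodeKey? tree c "rank").isSome
    else
      decide (c = 2 * p + 1) && (nodeKey? tree c "num").isSome

def Pre_inquire (value : Int) (tree : List (List (String × Int))) : Prop :=
  (nodeKey? tree 0 "rank").isSome = true ∧
  ∃ q < tree.length, nodeKey? tree q "value" = some value ∧
    ∀ k < Nat.log2 (q + 1), edgeOk value tree q (k + 1) = true

instance (value : Int) (tree : List (List (String × Int))) : Decidable (Pre_inquire value tree) := by
  unfold Pre_inquire; infer_instance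

def pvWitness_inquire : Int × (List (List (String × Int))) :=
  (3, [[("value", 2), ("num", 1), ("rank", 2)],
       [("value", 1), ("num", 1), ("rank", 1)],
       [("value", 3), ("num", 1), ("rank", 3)]])

def Spec_inquire (value : Int) (tree : List (List (String × Int))) (out : Int) : Prop := out = inquire_alt value tree
instance (value : Int) (tree : List (List (String × Int))) (out : Int) : Decidable (Spec_inquire value tree out) := by unfold Spec_inquire; infer_instance

-- ===== CLAIM =====
def Claim_equal_inquire : Prop := ∀ (value : Int) (tree : List (List (String × Int))), Dom_inquire value tree → Pre_inquire value tree → Spec_inquire value tree (inquire value tree)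

-- ===== LEMMAS AND PROOFS =====

-- the path list always starts with its root index
theorem pathB_cons (value : Int) (tree : List (List (String × Int))) :
    ∀ (fuel p : Nat), ∃ t, pathB value tree fuel p = p :: t := by
  intro fuel p
  cases fuel with
  | zero => exact ⟨[], rfl⟩
  | succ n =>
    by_cases h : nodeGet tree p "value" = value
    · exact ⟨[], by simp [pathB, h]⟩
    · exact ⟨pathB value tree n
        (if value > nodeGet tree p "value" then 2 * p + 2 else 2 * p + 1),
        by simp [pathB, h]⟩

-- folding the edge adjustments over the path equals A's accumulator loop
theorem foldPath_eq_loop (value : Int) (tree : List (List (String × Int))) :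
    ∀ (fuel p : Nat) (r : Int),
      ((pathB value tree fuel p).zip (pathB value tree fuel p).tail).foldl
        (edgeStep tree) r = inquireLoop value tree fuel p r := by
  intro fuel
  induction fuel with
  | zero => intro p r; simp [pathB, inquireLoop]
  | succ n ih =>
    intro p r
    by_cases h : nodeGet tree p "value" = value
    · simp [pathB, inquireLoop, h]
    · by_cases hgt : value > nodeGet tree p "value"
      · obtain ⟨t, ht⟩ := pathB_cons value tree n (2 * p + 2)
        have h2 := ih (2 * p + 2)
          (r + nodeGet tree p "num" + nodeGet tree (2 * p + 2) "rank")
        rw [ht] at h2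
        simp only [List.tail_cons] at h2
        simp [pathB, inquireLoop, h, hgt, ht, edgeStep, h2]
      · obtain ⟨t, ht⟩ := pathB_cons value tree n (2 * p + 1)
        have h2 := ih (2 * p + 1) (r - nodeGet tree (2 * p + 1) "num")
        rw [ht] at h2
        simp only [List.tail_cons] at h2
        simp [pathB, inquireLoop, h, hgt, ht, edgeStep, h2]

-- shifting the fold's start by a constant shifts its result (each step is additive)
theorem foldPath_shift (tree : List (List (String × Int))) :
    ∀ (l : List (Nat × Nat)) (r c : Int),
      l.foldl (edgeStep tree) (r + c) = l.foldl (edgeStep tree) r + c := by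
  intro l
  induction l with
  | nil => intro r c; rfl
  | cons hd tl ih =>
    intro r c
    simp only [List.foldl_cons, edgeStep]
    by_cases h : hd.2 = 2 * hd.1 + 2
    · rw [if_pos h, if_pos h,
        show r + c + nodeGet tree hd.1 "num" + nodeGet tree hd.2 "rank"
          = (r + nodeGet tree hd.1 "num" + nodeGet tree hd.2 "rank") + c by ring, ih]
    · rw [if_neg h, if_neg h,
        show r + c - nodeGet tree hd.2 "num" = (r - nodeGet tree hd.2 "num") + c by ring, ih]

-- ===== VERDICT =====
theorem inquire_spec : Claim_equal_inquire := by
  intro value tree _ _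
  unfold Spec_inquire inquire inquire_alt
  rw [foldPath_shift, foldPath_eq_loop]
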